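-- pv_equiv track=rewrite | github.com/pypi-data/pypi-mirror-382 | packages/psk-viewer/psk_viewer-0.10.0.1.tar.gz/psk_viewer-0.10.0.1/src/psk_viewer/utils.py | superscript_number
-- ===== SOURCE A (Python) =====
-- def superscript_number(number: str) -> str:
--     ss_dict = {
--         "0": "⁰",
--         "1": "¹",
--         "2": "²",
--         "3": "³",
--         "4": "⁴",
--         "5": "⁵",
--         "6": "⁶",
--         "7": "⁷",
--         "8": "⁸",
--         "9": "⁹",
--         "-": "⁻",
--         "−": "⁻",
--     }
--     for d in ss_dict:
--         number = number.replace(d, ss_dict[d])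
--     return number
-- ===== SOURCE B (Python) =====
-- def superscript_number(number: str) -> str:
--     ss_dict = {
--         "0": "⁰",
--         "1": "¹",
--         "2": "²",
--         "3": "³",
--         "4": "⁴",
--         "5": "⁵",
--         "6": "⁶",
--         "7": "⁷",
--         "8": "⁸",
--         "9": "⁹",
--         "-": "⁻",
--         "−": "⁻",
--     }
--     return "".join(ss_dict.get(c, c) for c in number)
-- ===== Notes on version B (the rewrite author's own statement) =====
-- stated objective: simpler
-- what changed: Replaces A's 12 sequential whole-string str.replace passes with a single left-to-right per-character dict lookup joined into the result; equivalent because no superscript output character is itself a key, so A's replaces never cascade.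
import Mathlib
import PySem

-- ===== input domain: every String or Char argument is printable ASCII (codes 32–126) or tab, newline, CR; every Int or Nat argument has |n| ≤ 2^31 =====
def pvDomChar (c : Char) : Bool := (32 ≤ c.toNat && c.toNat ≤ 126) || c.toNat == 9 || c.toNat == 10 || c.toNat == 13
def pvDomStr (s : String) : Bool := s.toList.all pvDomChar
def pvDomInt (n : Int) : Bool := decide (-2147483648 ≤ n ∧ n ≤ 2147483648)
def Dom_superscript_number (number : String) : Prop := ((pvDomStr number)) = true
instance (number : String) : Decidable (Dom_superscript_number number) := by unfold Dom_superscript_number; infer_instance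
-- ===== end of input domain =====

-- B replaces A's 12 sequential whole-string replace passes with one per-character lookup pass (objective: simpler).


-- ===== PORT A =====
-- the dict literal of A, as an association list in insertion order
def ssDict : List (String × String) :=
  [("0", "⁰"), ("1", "¹"), ("2", "²"), ("3", "³"), ("4", "⁴"), ("5", "⁵"),
   ("6", "⁶"), ("7", "⁷"), ("8", "⁸"), ("9", "⁹"), ("-", "⁻"), ("−", "⁻")]

-- for d in ss_dict: number = number.replace(d, ss_dict[d])
def superscript_number (number : String) : String :=
  ssDict.foldl (fun acc kv => PySem.Str.replace acc kv.1 kv.2) number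

-- ===== PORT B =====
-- Source B's dict with the length-1 string keys/values as Chars (iteration over a str yields its characters)
def ssAlt : PySem.Dict Char Char := PySem.Dict.mk
  [('0', '⁰'), ('1', '¹'), ('2', '²'), ('3', '³'), ('4', '⁴'), ('5', '⁵'),
   ('6', '⁶'), ('7', '⁷'), ('8', '⁸'), ('9', '⁹'), ('-', '⁻'), ('−', '⁻')]

-- "".join(ss_dict.get(c, c) for c in number)
def superscript_number_alt (number : String) : String :=
  String.ofList (number.toList.map (fun c => (PySem.Dict.get? ssAlt c).getD c))

-- ===== PRECONDITION & SPEC =====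
def Spec_superscript_number (number : String) (out : String) : Prop := out = superscript_number_alt number
instance (number : String) (out : String) : Decidable (Spec_superscript_number number out) := by unfold Spec_superscript_number; infer_instance

-- ===== CLAIM (what is proved, stated in full; the proofs are below) =====
def Claim_equal_superscript_number : Prop := ∀ (number : String), Dom_superscript_number number → Spec_superscript_number number (superscript_number number)

-- ===== LEMMAS AND PROOFS =====

-- replacing a single-character pattern by a single character is a pointwise map
lemma go_single (a b : Char) :
    ∀ (cs : List Char) (acc : List Char) (fuel : Nat), cs.length ≤ fuel →
      PySem.Chars.replace.go [a] [b] fuel cs acc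
        = acc.reverse ++ cs.map (fun c => if c = a then b else c) := by
  intro cs
  induction cs with
  | nil =>
      intro acc fuel _
      cases fuel <;> simp [PySem.Chars.replace.go]
  | cons c t ih =>
      intro acc fuel hfuel
      cases fuel with
      | zero => simp at hfuel
      | succ n =>
          by_cases h : c = a
          · subst h
            have : [c].isPrefixOf (c :: t) = true := by simp [List.isPrefixOf]
            simp only [PySem.Chars.replace.go, this, if_pos, List.length_cons,
              List.length_nil, List.drop_succ_cons, List.drop_zero, List.reverse_cons,
              List.reverse_nil, List.nil_append, List.singleton_append]
            rw [ih (b :: acc) n (by simpa using hfuel)]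
            simp
          · have : [a].isPrefixOf (c :: t) = false := by
              simp [List.isPrefixOf]; exact fun hh => absurd hh.symm h
            simp only [PySem.Chars.replace.go, this, Bool.false_eq_true, if_neg, not_false_iff]
            rw [ih (c :: acc) n (by simpa using hfuel)]
            simp [h]

lemma replace_single (cs : List Char) (a b : Char) :
    PySem.Chars.replace cs [a] [b] = cs.map (fun c => if c = a then b else c) := by
  rw [PySem.Chars.replace]
  simp only [List.isEmpty_cons, Bool.false_eq_true, if_neg, not_false_iff]
  simpa using go_single a b cs [] cs.length (le_refl _)

-- the composite of A's twelve per-character substitutions equals B's lookup, for every character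
lemma per_char (c : Char) :
    (fun x => if x = '−' then '⁻' else x)
    ((fun x => if x = '-' then '⁻' else x)
    ((fun x => if x = '9' then '⁹' else x)
    ((fun x => if x = '8' then '⁸' else x)
    ((fun x => if x = '7' then '⁷' else x)
    ((fun x => if x = '6' then '⁶' else x)
    ((fun x => if x = '5' then '⁵' else x)
    ((fun x => if x = '4' then '⁴' else x)
    ((fun x => if x = '3' then '³' else x)
    ((fun x => if x = '2' then '²' else x)
    ((fun x => if x = '1' then '¹' else x)
    ((fun x => if x = '0' then '⁰' else x) c)))))))))))
      = (PySem.Dict.get? ssAlt c).getD c := by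
  by_cases h0 : c = '0'; · subst h0; decide
  by_cases h1 : c = '1'; · subst h1; decide
  by_cases h2 : c = '2'; · subst h2; decide
  by_cases h3 : c = '3'; · subst h3; decide
  by_cases h4 : c = '4'; · subst h4; decide
  by_cases h5 : c = '5'; · subst h5; decide
  by_cases h6 : c = '6'; · subst h6; decide
  by_cases h7 : c = '7'; · subst h7; decide
  by_cases h8 : c = '8'; · subst h8; decide
  by_cases h9 : c = '9'; · subst h9; decide
  by_cases hm : c = '-'; · subst hm; decide
  by_cases hu : c = '−'; · subst hu; decide
  simp only [if_neg h0, if_neg h1, if_neg h2, if_neg h3, if_neg h4, if_neg h5, if_neg h6,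
    if_neg h7, if_neg h8, if_neg h9, if_neg hm, if_neg hu]
  simp [ssAlt, PySem.Dict.get?, beq_iff_eq,
    Ne.symm h0, Ne.symm h1, Ne.symm h2, Ne.symm h3, Ne.symm h4, Ne.symm h5,
    Ne.symm h6, Ne.symm h7, Ne.symm h8, Ne.symm h9, Ne.symm hm, Ne.symm hu]

-- A's twelve map passes collapse into B's single lookup pass
lemma chain_maps (cs : List Char) :
    List.map (fun x => if x = '−' then '⁻' else x)
    (List.map (fun x => if x = '-' then '⁻' else x)
    (List.map (fun x => if x = '9' then '⁹' else x)
    (List.map (fun x => if x = '8' then '⁸' else x)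
    (List.map (fun x => if x = '7' then '⁷' else x)
    (List.map (fun x => if x = '6' then '⁶' else x)
    (List.map (fun x => if x = '5' then '⁵' else x)
    (List.map (fun x => if x = '4' then '⁴' else x)
    (List.map (fun x => if x = '3' then '³' else x)
    (List.map (fun x => if x = '2' then '²' else x)
    (List.map (fun x => if x = '1' then '¹' else x)
    (List.map (fun x => if x = '0' then '⁰' else x) cs)))))))))))
      = cs.map (fun c => (PySem.Dict.get? ssAlt c).getD c) := by
  induction cs with
  | nil => simp
  | cons c t ih =>
      simp only [List.map_cons]
      exact congrArg₂ List.cons (per_char c) ih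

-- ===== VERDICT (by name: the statement is the Claim_ definition above) =====
theorem superscript_number_spec : Claim_equal_superscript_number := by
  intro number _
  show superscript_number number = superscript_number_alt number
  have hlist : (superscript_number number).toList
      = number.toList.map (fun c => (PySem.Dict.get? ssAlt c).getD c) := by
    simp only [superscript_number, ssDict, List.foldl_cons, List.foldl_nil]
    simp only [PySem.Str.toList_replace]
    simp only [show ("0":String).toList = ['0'] from rfl, show ("1":String).toList = ['1'] from rfl,
      show ("2":String).toList = ['2'] from rfl, show ("3":String).toList = ['3'] from rfl,
      show ("4":String).toList = ['4'] from rfl, show ("5":String).toList = ['5'] from rfl,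
      show ("6":String).toList = ['6'] from rfl, show ("7":String).toList = ['7'] from rfl,
      show ("8":String).toList = ['8'] from rfl, show ("9":String).toList = ['9'] from rfl,
      show ("-":String).toList = ['-'] from rfl, show ("−":String).toList = ['−'] from rfl,
      show ("⁰":String).toList = ['⁰'] from rfl, show ("¹":String).toList = ['¹'] from rfl,
      show ("²":String).toList = ['²'] from rfl, show ("³":String).toList = ['³'] from rfl,
      show ("⁴":String).toList = ['⁴'] from rfl, show ("⁵":String).toList = ['⁵'] from rfl,
      show ("⁶":String).toList = ['⁶'] from rfl, show ("⁷":String).toList = ['⁷'] from rfl,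
      show ("⁸":String).toList = ['⁸'] from rfl, show ("⁹":String).toList = ['⁹'] from rfl,
      show ("⁻":String).toList = ['⁻'] from rfl]
    simp only [replace_single]
    exact chain_maps number.toList
  calc superscript_number number
      = String.ofList (superscript_number number).toList := (String.ofList_toList (s := superscript_number number)).symm
    _ = String.ofList (number.toList.map (fun c => (PySem.Dict.get? ssAlt c).getD c)) := by
        rw [hlist]
    _ = superscript_number_alt number := rfl
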